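-- pv_equiv track=rewrite | github.com/andresr27/hackerrank-python | Porject Euler/Project_Euler_237_Mazare.py | sCount
-- ===== SOURCE A (Python) =====
-- mod = (10 ** 9)+7
--
-- cacheT = {}
--
-- allowed_transitions = set([
--   (0,0), (0,2), (2,1), (0,8), (0,7), (7,1),
--   (1,1), (1,4), (4,0),
--   (2,4), (3,6), (4,5), (4,7), (4,8),
--   (4,2), (6,3), (5,4), (7,4), (8,4)
-- ])
--
-- def tCount(pos,out,width):
--   elem = (pos, out, width)
--
--   if elem in cacheT:
--     return cacheT[elem]
--   if width == 1:
--     if (pos, out) in allowed_transitions: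
--       return 1
--     else:
--       return 0
--   r = 0
--   left_rec = width // 2
--   right_rec = width - left_rec
--   for i in range(8):
--     comb = tCount(pos, i, left_rec) * tCount(i, out, right_rec)
--     r += comb
--     r = r % mod
--   #res = res % mod
--   cacheT[elem] = r
--   return r
--
-- def sCount(m_min,m,n):
--      #elem = (m,n)
--      #if elem in cacheS:
--     #     return cacheS[elem]
--      r=0
--      if n > 1:
--          r += sCount(m_min,m,n-1) + tCount(m_min,m,n)
--      elif n == 1: r= 1
--      else: r = 0
--      r = r % mod
--      #cacheS[elem] = r
--      return r
-- ===== SOURCE B (Python) =====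
-- mod = (10 ** 9)+7
--
-- allowed_transitions = set([
--   (0,0), (0,2), (2,1), (0,8), (0,7), (7,1),
--   (1,1), (1,4), (4,0),
--   (2,4), (3,6), (4,5), (4,7), (4,8),
--   (4,2), (6,3), (5,4), (7,4), (8,4)
-- ])
--
-- def sCount(m_min, m, n):
--     # iterative: maintain the row vector row[j] = tCount(m_min, j, w) and a
--     # running total; no recursion, no memo table.
--     if n < 1:
--         return 0
--     row = [1 if (m_min, j) in allowed_transitions else 0 for j in range(9)]
--     total = 1
--     for _ in range(n - 1):
--         row = [sum(row[i] for i in range(8) if (i, j) in allowed_transitions) % mod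
--                for j in range(9)]
--         total = (total + (row[m] if 0 <= m < 9 else 0)) % mod
--     return total
-- ===== Notes on version B (the rewrite author's own statement) =====
-- stated objective: simpler
-- what changed: Replaced A's memoized divide-and-conquer recursion (tCount binary width-splitting with a global cache dict plus an n-deep sCount recursion) by a single iterative loop that maintains the 9-entry row vector of transition counts and a running total, with no recursion and no cache.
-- outside the precondition, e.g. on sCount(0, 0, 950): A returns 360532754, B returns 360532754
import Mathlib
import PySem

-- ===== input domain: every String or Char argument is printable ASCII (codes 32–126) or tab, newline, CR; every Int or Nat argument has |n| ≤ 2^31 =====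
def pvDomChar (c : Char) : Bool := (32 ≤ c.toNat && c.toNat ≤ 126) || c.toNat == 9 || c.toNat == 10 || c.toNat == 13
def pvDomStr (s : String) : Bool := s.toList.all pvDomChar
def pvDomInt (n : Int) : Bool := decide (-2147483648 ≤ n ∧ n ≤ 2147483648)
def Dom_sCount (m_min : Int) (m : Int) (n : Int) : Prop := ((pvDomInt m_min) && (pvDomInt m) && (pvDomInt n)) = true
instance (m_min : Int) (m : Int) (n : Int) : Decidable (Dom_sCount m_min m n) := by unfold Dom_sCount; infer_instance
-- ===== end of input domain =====

-- B replaces A's memoized divide-and-conquer recursion by one iterative loop over a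
-- 9-entry row vector (simpler: no recursion, no cache); return values agree on Pre_.

-- ===== PORT A =====
def pvMod : Int := 1000000007

def allowedL : List (Int × Int) :=
  [(0,0), (0,2), (2,1), (0,8), (0,7), (7,1),
   (1,1), (1,4), (4,0),
   (2,4), (3,6), (4,5), (4,7), (4,8),
   (4,2), (6,3), (5,4), (7,4), (8,4)]

-- literal port of tCount with its global memo table cacheT threaded as state (Python's
-- dict is a hash table, hence Std.HashMap; memoization does not change returned values —
-- proved below via the memo-free tCountP). The extra 'width ≤ 1 → 0' branch only makes the
-- recursion total on arguments the Python never reaches (sCount calls tCount with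
-- width = n ≥ 2 only; Python tCount does not terminate for width ≤ 0).
def tCountM (pos : Int) (outp : Int) (width : Int)
    (cache : Std.HashMap (Int × Int × Int) Int) : Int × Std.HashMap (Int × Int × Int) Int :=
  match cache.get? (pos, outp, width) with
  | some v => (v, cache)
  | none =>
    if width = 1 then ((if (pos, outp) ∈ allowedL then 1 else 0), cache)
    else if width ≤ 1 then (0, cache)
    else
      let res :=
        (List.range 8).foldl
          (fun (st : Int × Std.HashMap (Int × Int × Int) Int) i =>
            let t1 := tCountM pos (Int.ofNat i) (PySem.Int.floordiv width 2) st.2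
            let t2 := tCountM (Int.ofNat i) outp (width - PySem.Int.floordiv width 2) t1.2
            (PySem.Int.mod (st.1 + t1.1 * t2.1) pvMod, t2.2))
          (0, cache)
      (res.1, res.2.insert (pos, outp, width) res.1)
termination_by width.toNat
decreasing_by
  · rw [PySem.Int.floordiv_eq_ediv_of_pos (by norm_num)]; omega
  · rw [PySem.Int.floordiv_eq_ediv_of_pos (by norm_num)]; omega

def sCountM (m_min : Int) (m : Int) (n : Int)
    (cache : Std.HashMap (Int × Int × Int) Int) : Int × Std.HashMap (Int × Int × Int) Int :=
  if n > 1 then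
    let s := sCountM m_min m (n - 1) cache
    let t := tCountM m_min m n s.2
    (PySem.Int.mod (s.1 + t.1) pvMod, t.2)
  else if n = 1 then (PySem.Int.mod 1 pvMod, cache)
  else (PySem.Int.mod 0 pvMod, cache)
termination_by n.toNat
decreasing_by omega

-- the top-level entry: Python's cacheT starts empty; it persisting across top-level calls
-- does not affect return values (memoization is value-transparent, proved below)
def sCount (m_min : Int) (m : Int) (n : Int) : Int := (sCountM m_min m n ∅).1

-- ===== PORT B =====
def stepRow (row : List Int) : List Int :=
  (List.range 9).map (fun j =>
    PySem.Int.mod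
      ((List.range 8).foldl
        (fun s i => if (Int.ofNat i, Int.ofNat j) ∈ allowedL then s + row.getD i 0 else s) 0)
      pvMod)

def sCount_alt (m_min : Int) (m : Int) (n : Int) : Int :=
  if n < 1 then 0
  else
    let row0 : List Int :=
      (List.range 9).map (fun j => if (m_min, Int.ofNat j) ∈ allowedL then (1 : Int) else 0)
    ((List.range (n - 1).toNat).foldl
      (fun (st : List Int × Int) _ =>
        let row := stepRow st.1
        (row, PySem.Int.mod (st.2 + (if 0 ≤ m ∧ m < 9 then row.getD m.toNat 0 else 0)) pvMod))
      (row0, 1)).2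

-- ===== PRECONDITION & SPEC =====
-- Pre_ excludes n > 900: there Python A's sCount recursion (depth n) exhausts CPython's
-- default recursion limit and raises RecursionError (the exact threshold, near n = 997,
-- depends on the interpreter's existing stack depth, hence the margin).
def Pre_sCount (m_min : Int) (m : Int) (n : Int) : Prop := n ≤ 900
instance (m_min : Int) (m : Int) (n : Int) : Decidable (Pre_sCount m_min m n) := by
  unfold Pre_sCount; infer_instance

def pvWitness_sCount : Int × Int × Int := (0, 4, 5)

def Spec_sCount (m_min : Int) (m : Int) (n : Int) (out : Int) : Prop := out = sCount_alt m_min m n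
instance (m_min : Int) (m : Int) (n : Int) (out : Int) : Decidable (Spec_sCount m_min m n out) := by
  unfold Spec_sCount; infer_instance

-- ===== CLAIM (what is proved, stated in full; the proofs are below) =====
def Claim_equal_sCount : Prop := ∀ (m_min : Int) (m : Int) (n : Int), Dom_sCount m_min m n → Pre_sCount m_min m n → Spec_sCount m_min m n (sCount m_min m n)

-- ===== LEMMAS AND PROOFS =====

-- memo-free reference versions of the two recursions (proof helpers)
def tCountP (pos : Int) (outp : Int) (width : Int) : Int :=
  if width = 1 then (if (pos, outp) ∈ allowedL then 1 else 0)
  else if width ≤ 1 then 0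
  else
    (List.range 8).foldl
      (fun r i =>
        PySem.Int.mod
          (r + tCountP pos (Int.ofNat i) (PySem.Int.floordiv width 2) *
               tCountP (Int.ofNat i) outp (width - PySem.Int.floordiv width 2)) pvMod)
      0
termination_by width.toNat
decreasing_by
  · rw [PySem.Int.floordiv_eq_ediv_of_pos (by norm_num)]; omega
  · rw [PySem.Int.floordiv_eq_ediv_of_pos (by norm_num)]; omega

def sCountP (m_min : Int) (m : Int) (n : Int) : Int :=
  if n > 1 then PySem.Int.mod (sCountP m_min m (n - 1) + tCountP m_min m n) pvMod
  else if n = 1 then PySem.Int.mod 1 pvMod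
  else PySem.Int.mod 0 pvMod
termination_by n.toNat
decreasing_by omega

-- the memo cache only ever stores correct (memo-free) values
def CacheOK (c : Std.HashMap (Int × Int × Int) Int) : Prop :=
  ∀ p o w v, c.get? (p, o, w) = some v → v = tCountP p o w

theorem cacheOK_empty : CacheOK ∅ := by
  intro p o w v h
  simp [Std.HashMap.get?_eq_getElem?] at h

theorem cacheOK_insert (c : Std.HashMap (Int × Int × Int) Int) (hc : CacheOK c)
    (p o w v : Int) (hv : v = tCountP p o w) : CacheOK (c.insert (p, o, w) v) := by
  intro p' o' w' v' hv'
  rw [Std.HashMap.get?_eq_getElem?, Std.HashMap.getElem?_insert] at hv'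
  split at hv'
  · rename_i heq
    obtain ⟨e1, e2, e3⟩ : p = p' ∧ o = o' ∧ w = w' := by simpa [Prod.ext_iff] using heq
    injection hv' with hv''
    subst hv''
    subst e1; subst e2; subst e3
    exact hv
  · exact hc p' o' w' v' (by rw [Std.HashMap.get?_eq_getElem?]; exact hv')

theorem tCountM_okAux : ∀ (k : ℕ) (width : Int), width.toNat = k →
    ∀ (pos outp : Int) (c : Std.HashMap (Int × Int × Int) Int), CacheOK c →
      (tCountM pos outp width c).1 = tCountP pos outp width ∧
        CacheOK (tCountM pos outp width c).2 := by
  intro k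
  induction k using Nat.strong_induction_on with
  | _ k IH =>
  intro width hw pos outp c hc
  have IH' : ∀ (w' : Int), w'.toNat < width.toNat → ∀ (p o : Int)
      (c' : Std.HashMap (Int × Int × Int) Int), CacheOK c' →
      (tCountM p o w' c').1 = tCountP p o w' ∧ CacheOK (tCountM p o w' c').2 := by
    intro w' hlt p o c' hc'
    exact IH w'.toNat (by omega) w' rfl p o c' hc'
  rw [tCountM]
  split
  next v hhit =>
    exact ⟨hc pos outp width v hhit, hc⟩
  next hhit =>
  by_cases h1 : width = 1
  · rw [if_pos h1, tCountP, if_pos h1]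
    exact ⟨rfl, hc⟩
  by_cases h2 : width ≤ 1
  · rw [if_neg h1, if_pos h2, tCountP, if_neg h1, if_pos h2]
    exact ⟨rfl, hc⟩
  rw [if_neg h1, if_neg h2, tCountP, if_neg h1, if_neg h2]
  have hlv : (PySem.Int.floordiv width 2).toNat < width.toNat := by
    rw [PySem.Int.floordiv_eq_ediv_of_pos (by norm_num)]; omega
  have hrv : (width - PySem.Int.floordiv width 2).toNat < width.toNat := by
    rw [PySem.Int.floordiv_eq_ediv_of_pos (by norm_num)]; omega
  have hfold : ∀ (xs : List ℕ) (st : Int × Std.HashMap (Int × Int × Int) Int), CacheOK st.2 →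
      (xs.foldl
        (fun (st : Int × Std.HashMap (Int × Int × Int) Int) i =>
          let t1 := tCountM pos (Int.ofNat i) (PySem.Int.floordiv width 2) st.2
          let t2 := tCountM (Int.ofNat i) outp (width - PySem.Int.floordiv width 2) t1.2
          (PySem.Int.mod (st.1 + t1.1 * t2.1) pvMod, t2.2))
        st).1
      = xs.foldl
          (fun r i =>
            PySem.Int.mod
              (r + tCountP pos (Int.ofNat i) (PySem.Int.floordiv width 2) *
                   tCountP (Int.ofNat i) outp (width - PySem.Int.floordiv width 2)) pvMod)
          st.1 ∧
      CacheOK (xs.foldl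
        (fun (st : Int × Std.HashMap (Int × Int × Int) Int) i =>
          let t1 := tCountM pos (Int.ofNat i) (PySem.Int.floordiv width 2) st.2
          let t2 := tCountM (Int.ofNat i) outp (width - PySem.Int.floordiv width 2) t1.2
          (PySem.Int.mod (st.1 + t1.1 * t2.1) pvMod, t2.2))
        st).2 := by
    intro xs
    induction xs with
    | nil => intro st hst; exact ⟨rfl, hst⟩
    | cons x xs ihx =>
      intro st hst
      have h1' := IH' _ hlv pos (Int.ofNat x) st.2 hst
      have h2' := IH' _ hrv (Int.ofNat x) outp _ h1'.2
      simp only [List.foldl_cons]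
      rw [h1'.1, h2'.1]
      exact ihx _ h2'.2
  have hres := hfold (List.range 8) (0, c) hc
  have hval : ((List.range 8).foldl
      (fun (st : Int × Std.HashMap (Int × Int × Int) Int) i =>
        let t1 := tCountM pos (Int.ofNat i) (PySem.Int.floordiv width 2) st.2
        let t2 := tCountM (Int.ofNat i) outp (width - PySem.Int.floordiv width 2) t1.2
        (PySem.Int.mod (st.1 + t1.1 * t2.1) pvMod, t2.2))
      (0, c)).1 = tCountP pos outp width := by
    rw [tCountP, if_neg h1, if_neg h2]
    exact hres.1
  exact ⟨hres.1, cacheOK_insert _ hres.2 pos outp width _ hval⟩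

theorem tCountM_ok (pos outp width : Int) (c : Std.HashMap (Int × Int × Int) Int)
    (hc : CacheOK c) :
    (tCountM pos outp width c).1 = tCountP pos outp width ∧
      CacheOK (tCountM pos outp width c).2 :=
  tCountM_okAux width.toNat width rfl pos outp c hc

theorem sCountM_okAux : ∀ (k : ℕ) (n : Int), n.toNat = k →
    ∀ (m_min m : Int) (c : Std.HashMap (Int × Int × Int) Int), CacheOK c →
      (sCountM m_min m n c).1 = sCountP m_min m n ∧ CacheOK (sCountM m_min m n c).2 := by
  intro k
  induction k using Nat.strong_induction_on with
  | _ k IH =>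
  intro n hn m_min m c hc
  rw [sCountM, sCountP]
  by_cases h1 : n > 1
  · rw [if_pos h1, if_pos h1]
    have hs := IH (n-1).toNat (by omega) (n-1) rfl m_min m c hc
    have ht := tCountM_ok m_min m n _ hs.2
    simp only []
    rw [hs.1, ht.1]
    exact ⟨rfl, ht.2⟩
  · rw [if_neg h1, if_neg h1]
    split
    · exact ⟨rfl, hc⟩
    · exact ⟨rfl, hc⟩

theorem sCount_eq_sCountP (m_min m n : Int) : sCount m_min m n = sCountP m_min m n := by
  unfold sCount
  exact (sCountM_okAux n.toNat n rfl m_min m ∅ cacheOK_empty).1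

theorem pymod_eq (x : Int) : PySem.Int.mod x pvMod = x % pvMod :=
  PySem.Int.mod_eq_emod_of_pos (by norm_num [pvMod])

theorem pyfdiv_two (x : Int) : PySem.Int.floordiv x 2 = x / 2 :=
  PySem.Int.floordiv_eq_ediv_of_pos (by norm_num)

-- canonical indicator and right-peeling iterated transition counts
def ind (a b : Int) : Int := if (a, b) ∈ allowedL then 1 else 0

def G : ℕ → Int → Int → Int
  | 0, _, _ => 0
  | 1, a, b => ind a b
  | (k+2), a, b =>
      ((List.range 8).foldl (fun s i => s + G (k+1) a (Int.ofNat i) * ind (Int.ofNat i) b) 0) % pvMod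

def rowG (k : ℕ) (a : Int) : List Int := (List.range 9).map (fun j => G k a (Int.ofNat j))

def gz (k : ℕ) (a b : Int) : ZMod 1000000007 := ((G k a b : Int) : ZMod 1000000007)

theorem ind_snd_zero (a b : Int) (h : ¬ (0 ≤ b ∧ b < 9)) : ind a b = 0 := by
  unfold ind
  split_ifs with hmem
  · exfalso; simp [allowedL] at hmem; omega
  · rfl

theorem cast_mod_p (a : Int) : ((a % pvMod : Int) : ZMod 1000000007) = (a : ZMod 1000000007) := by
  have h : pvMod = ((1000000007 : ℕ) : Int) := by norm_num [pvMod]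
  rw [h]
  exact ZMod.intCast_mod a 1000000007

theorem int_eq_of_cast_eq (a b : Int) (ha0 : 0 ≤ a) (ha1 : a < pvMod) (hb0 : 0 ≤ b)
    (hb1 : b < pvMod) (h : (a : ZMod 1000000007) = (b : ZMod 1000000007)) : a = b := by
  rw [ZMod.intCast_eq_intCast_iff'] at h
  push_cast at h
  simp only [pvMod] at ha1 hb1
  omega

theorem foldl_mod_bounds (f : ℕ → Int) :
    ∀ (xs : List ℕ) (c : Int), xs ≠ [] →
      0 ≤ xs.foldl (fun r i => (r + f i) % pvMod) c ∧
        xs.foldl (fun r i => (r + f i) % pvMod) c < pvMod := by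
  intro xs
  induction xs with
  | nil => intro c h; exact absurd rfl h
  | cons x xs ih =>
    intro c _
    cases xs with
    | nil =>
      simp only [List.foldl_cons, List.foldl_nil]
      exact ⟨Int.emod_nonneg _ (by norm_num [pvMod]), Int.emod_lt_of_pos _ (by norm_num [pvMod])⟩
    | cons y ys =>
      simpa only [List.foldl_cons] using ih ((c + f x) % pvMod) (by simp)

theorem cast_foldl_mod (f : ℕ → Int) :
    ∀ (xs : List ℕ) (c : Int),
      ((xs.foldl (fun r i => (r + f i) % pvMod) c : Int) : ZMod 1000000007)
        = (c : ZMod 1000000007) + (xs.map fun i => ((f i : Int) : ZMod 1000000007)).sum := by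
  intro xs
  induction xs with
  | nil => intro c; simp
  | cons x xs ih =>
    intro c
    simp only [List.foldl_cons, List.map_cons, List.sum_cons]
    rw [ih, cast_mod_p]
    push_cast
    ring

theorem G_bounds (k : ℕ) (hk : 1 ≤ k) (a b : Int) : 0 ≤ G k a b ∧ G k a b < pvMod := by
  match k, hk with
  | 1, _ =>
    show 0 ≤ ind a b ∧ ind a b < pvMod
    unfold ind; split_ifs <;> norm_num [pvMod]
  | (k+2), _ =>
    show 0 ≤ _ % pvMod ∧ _ % pvMod < pvMod
    exact ⟨Int.emod_nonneg _ (by norm_num [pvMod]), Int.emod_lt_of_pos _ (by norm_num [pvMod])⟩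

theorem sum_map_range {M : Type} [AddCommMonoid M] (n : ℕ) (f : ℕ → M) :
    ((List.range n).map f).sum = ∑ i ∈ Finset.range n, f i := by
  induction n with
  | zero => simp
  | succ n ih =>
    rw [List.range_succ, Finset.sum_range_succ, List.map_append, List.sum_append]
    simp [ih]

theorem gz_succ (k : ℕ) (hk : 1 ≤ k) (a b : Int) :
    gz (k+1) a b = ∑ i ∈ Finset.range 8, gz k a (Int.ofNat i) * gz 1 (Int.ofNat i) b := by
  match k, hk with
  | (k+1), _ =>
    show ((G (k+2) a b : Int) : ZMod 1000000007) = _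
    rw [show G (k+2) a b =
        ((List.range 8).foldl (fun s i => s + G (k+1) a (Int.ofNat i) * ind (Int.ofNat i) b) 0) % pvMod
      from rfl]
    rw [cast_mod_p, PySem.List.foldl_add]
    rw [zero_add]
    rw [show (((List.map (fun i => G (k + 1) a (Int.ofNat i) * ind (Int.ofNat i) b) (List.range 8)).sum : Int) : ZMod 1000000007)
        = ((List.map (fun i => G (k + 1) a (Int.ofNat i) * ind (Int.ofNat i) b) (List.range 8)).map
            (fun x : Int => (x : ZMod 1000000007))).sum
      from map_list_sum (Int.castRingHom (ZMod 1000000007)) _]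
    rw [List.map_map, sum_map_range]
    refine Finset.sum_congr rfl (fun i _ => ?_)
    show ((G (k+1) a (Int.ofNat i) * ind (Int.ofNat i) b : Int) : ZMod 1000000007) = _
    rw [Int.cast_mul]
    rfl

theorem gz_add (r : ℕ) (hr : 1 ≤ r) : ∀ (l : ℕ), 1 ≤ l → ∀ (a b : Int),
    gz (l + r) a b = ∑ i ∈ Finset.range 8, gz l a (Int.ofNat i) * gz r (Int.ofNat i) b := by
  induction r with
  | zero => omega
  | succ r ih =>
    intro l hl a b
    rcases Nat.eq_zero_or_pos r with h0 | h1
    · subst h0; exact gz_succ l hl a b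
    · rw [show l + (r + 1) = (l + r) + 1 from rfl, gz_succ (l + r) (by omega)]
      calc (∑ j ∈ Finset.range 8, gz (l + r) a (Int.ofNat j) * gz 1 (Int.ofNat j) b)
          = ∑ j ∈ Finset.range 8, ∑ i ∈ Finset.range 8,
              gz l a (Int.ofNat i) * gz r (Int.ofNat i) (Int.ofNat j) * gz 1 (Int.ofNat j) b := by
            refine Finset.sum_congr rfl (fun j _ => ?_)
            rw [ih h1 l hl a (Int.ofNat j), Finset.sum_mul]
        _ = ∑ i ∈ Finset.range 8, ∑ j ∈ Finset.range 8,
              gz l a (Int.ofNat i) * (gz r (Int.ofNat i) (Int.ofNat j) * gz 1 (Int.ofNat j) b) := by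
            rw [Finset.sum_comm]
            exact Finset.sum_congr rfl (fun i _ => Finset.sum_congr rfl (fun j _ => by ring))
        _ = ∑ i ∈ Finset.range 8, gz l a (Int.ofNat i) * gz (r + 1) (Int.ofNat i) b := by
            refine Finset.sum_congr rfl (fun i _ => ?_)
            rw [← Finset.mul_sum, gz_succ r h1]


theorem G_out_zero (k : ℕ) (hk : 1 ≤ k) (a b : Int) (h : ¬ (0 ≤ b ∧ b < 9)) : G k a b = 0 := by
  match k, hk with
  | 1, _ => exact ind_snd_zero a b h
  | (k+2), _ =>
    show ((List.range 8).foldl (fun s i => s + G (k+1) a (Int.ofNat i) * ind (Int.ofNat i) b) 0) % pvMod = 0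
    rw [show (fun (s : Int) (i : ℕ) => s + G (k+1) a (Int.ofNat i) * ind (Int.ofNat i) b)
        = (fun s _ => s) from by funext s i; rw [ind_snd_zero _ _ h]; ring]
    simp

theorem tCount_eq_G (w : ℕ) : 1 ≤ w → ∀ (pos outp : Int), tCountP pos outp (w : Int) = G w pos outp := by
  induction w using Nat.strong_induction_on with
  | _ w IH =>
    intro hw pos outp
    rcases Nat.lt_or_ge w 2 with h1 | h2
    · have hw1 : w = 1 := by omega
      subst hw1
      rw [tCountP]
      norm_num
      rfl
    · -- 2 ≤ w
      have hl1 : 1 ≤ w / 2 := by omega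
      have hr1 : 1 ≤ w - w / 2 := by omega
      have hlt : w / 2 < w := by omega
      have hrt : w - w / 2 < w := by omega
      have hsum : w / 2 + (w - w / 2) = w := by omega
      rw [tCountP]
      rw [if_neg (by exact_mod_cast (by omega : ¬ ((w : Int) = 1))),
          if_neg (by exact_mod_cast (by omega : ¬ ((w : Int) ≤ 1)))]
      have hdiv : PySem.Int.floordiv (w : Int) 2 = ((w / 2 : ℕ) : Int) := by
        rw [pyfdiv_two]; omega
      have hsub : (w : Int) - PySem.Int.floordiv (w : Int) 2 = ((w - w / 2 : ℕ) : Int) := by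
        rw [hdiv]; omega
      rw [show (fun (r : Int) (i : ℕ) =>
            PySem.Int.mod
              (r + tCountP pos (Int.ofNat i) (PySem.Int.floordiv (w : Int) 2) *
                   tCountP (Int.ofNat i) outp ((w : Int) - PySem.Int.floordiv (w : Int) 2)) pvMod)
          = (fun (r : Int) (i : ℕ) =>
              (r + G (w / 2) pos (Int.ofNat i) * G (w - w / 2) (Int.ofNat i) outp) % pvMod) from by
        funext r i
        rw [pymod_eq, hsub, hdiv, IH (w / 2) hlt hl1, IH (w - w / 2) hrt hr1]]
      have hb1 := foldl_mod_bounds (fun i => G (w / 2) pos (Int.ofNat i) * G (w - w / 2) (Int.ofNat i) outp)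
        (List.range 8) 0 (by simp)
      have hb2 := G_bounds w (by omega) pos outp
      refine int_eq_of_cast_eq _ _ hb1.1 hb1.2 hb2.1 hb2.2 ?_
      rw [cast_foldl_mod]
      rw [show ((0 : Int) : ZMod 1000000007) = 0 from rfl, zero_add, sum_map_range]
      have := gz_add (w - w / 2) hr1 (w / 2) hl1 pos outp
      rw [hsum] at this
      rw [show ((G w pos outp : Int) : ZMod 1000000007) = gz w pos outp from rfl, this]
      refine Finset.sum_congr rfl (fun i _ => ?_)
      rw [Int.cast_mul]
      rfl

theorem getD_rowG (k : ℕ) (a : Int) (i : ℕ) (hi : i < 9) : (rowG k a).getD i 0 = G k a (Int.ofNat i) := by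
  unfold rowG
  rw [List.getD_eq_getElem?_getD, List.getElem?_map, List.getElem?_range hi]
  rfl

theorem stepRow_rowG (k : ℕ) (hk : 1 ≤ k) (a : Int) : stepRow (rowG k a) = rowG (k+1) a := by
  match k, hk with
  | (k+1), _ =>
    unfold stepRow
    rw [show rowG (k+1+1) a = (List.range 9).map (fun j => G (k+2) a (Int.ofNat j)) from rfl]
    refine List.map_congr_left (fun j hj => ?_)
    rw [pymod_eq]
    rw [PySem.List.foldl_congr_mem (List.range 8)
        (fun s i => if (Int.ofNat i, Int.ofNat j) ∈ allowedL then s + (rowG (k+1) a).getD i 0 else s)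
        (fun (s : Int) (i : ℕ) => s + G (k+1) a (Int.ofNat i) * ind (Int.ofNat i) (Int.ofNat j))
        0
        (by
          intro acc i hi
          have hi9 : i < 9 := by have := List.mem_range.mp hi; omega
          show (if (Int.ofNat i, Int.ofNat j) ∈ allowedL then acc + (rowG (k+1) a).getD i 0 else acc)
              = acc + G (k+1) a (Int.ofNat i) * ind (Int.ofNat i) (Int.ofNat j)
          rw [getD_rowG (k+1) a i hi9]
          unfold ind
          split_ifs with hmem
          · ring
          · ring)]
    rfl

theorem row0_eq_rowG (m_min : Int) :
    (List.range 9).map (fun j => if (m_min, Int.ofNat j) ∈ allowedL then (1 : Int) else 0)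
      = rowG 1 m_min := rfl

theorem loop_inv (m_min m : Int) (k : ℕ) :
    (List.range k).foldl
      (fun (st : List Int × Int) _ =>
        let row := stepRow st.1
        (row, PySem.Int.mod (st.2 + (if 0 ≤ m ∧ m < 9 then row.getD m.toNat 0 else 0)) pvMod))
      (rowG 1 m_min, 1)
    = (rowG (k+1) m_min, sCountP m_min m ((k : Int) + 1)) := by
  induction k with
  | zero =>
    simp only [List.range_zero, List.foldl_nil, Nat.cast_zero, zero_add]
    rw [sCountP]
    norm_num [pymod_eq, pvMod]
  | succ k ih =>
    rw [List.range_succ, List.foldl_append, ih, List.foldl_cons, List.foldl_nil]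
    simp only [stepRow_rowG (k+1) (by omega)]
    have hX : (if 0 ≤ m ∧ m < 9 then (rowG (k+2) m_min).getD m.toNat 0 else 0)
        = tCountP m_min m ((k : Int) + 2) := by
      have hc : (((k+2 : ℕ) : Int)) = (k : Int) + 2 := by push_cast; ring
      split_ifs with hm
      · rw [getD_rowG (k+2) m_min m.toNat (by omega)]
        rw [show Int.ofNat m.toNat = m from Int.toNat_of_nonneg hm.1]
        rw [← hc, tCount_eq_G (k+2) (by omega)]
      · rw [← hc, tCount_eq_G (k+2) (by omega), G_out_zero (k+2) (by omega) _ _ hm]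
    rw [hX]
    have hstep : sCountP m_min m ((k : Int) + 2)
        = PySem.Int.mod (sCountP m_min m ((k : Int) + 1) + tCountP m_min m ((k : Int) + 2)) pvMod := by
      conv_lhs => rw [sCountP]
      rw [if_pos (by omega : ((k : Int) + 2) > 1),
          show (k : Int) + 2 - 1 = (k : Int) + 1 from by ring]
    rw [show (((k+1 : ℕ)) : Int) + 1 = (k : Int) + 2 from by push_cast; ring, hstep]

-- ===== VERDICT (by name: the statement is the Claim_ definition above) =====
theorem sCount_spec : Claim_equal_sCount := by
  intro m_min m n _ hpre
  unfold Spec_sCount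
  rw [sCount_eq_sCountP]
  by_cases hn : n < 1
  · rw [sCount_alt, if_pos hn, sCountP, if_neg (by omega), if_neg (by omega)]
    norm_num [pymod_eq, pvMod]
  · rw [sCount_alt, if_neg hn]
    simp only [row0_eq_rowG]
    rw [loop_inv m_min m ((n-1).toNat)]
    rw [show (((n-1).toNat : Int)) + 1 = n from by omega]
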